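-- pv_equiv track=rewrite | github.com/leftos/vatsim_control_recs | backend/core/groupings.py | resolve_grouping_recursively
-- ===== SOURCE A (Python) =====
-- from typing import Dict, List, Any, Optional, Set
--
-- def resolve_grouping_recursively(
--     grouping_name: str,
--     all_groupings: Dict[str, List[str]],
--     visited: Optional[Set[str]] = None
-- ) -> Set[str]:
--     """
--     Recursively resolve a grouping name to its individual airports.
--     Handles nested groupings by looking up grouping names and resolving them.
--
--     This function prevents infinite loops through cycle detection using the
--     visited set parameter.
--
--     Args:
--         grouping_name: Name of the grouping to resolve
--         all_groupings: Dictionary of all available groupings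
--         visited: Set of already-visited grouping names to prevent infinite loops
--
--     Returns:
--         Set of airport ICAO codes
--     """
--     if visited is None:
--         visited = set()
--
--     # Prevent infinite loops
--     if grouping_name in visited:
--         return set()
--     visited.add(grouping_name)
--
--     if grouping_name not in all_groupings:
--         return set()
--
--     airports: Set[str] = set()
--     items = all_groupings[grouping_name]
--
--     for item in items:
--         # Check if this item is itself a grouping name
--         if item in all_groupings:
--             # Recursively resolve the nested grouping
--             airports.update(resolve_grouping_recursively(item, all_groupings, visited))
--         else:
--             # It's an airport code, add it directly
--             airports.add(item)
--
--     return airports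
-- ===== SOURCE B (Python) =====
-- from typing import Dict, List, Optional, Set
--
--
-- def resolve_grouping_recursively(
--     grouping_name: str,
--     all_groupings: Dict[str, List[str]],
--     visited: Optional[Set[str]] = None
-- ) -> Set[str]:
--     """Iterative DFS with an explicit stack instead of recursion."""
--     if visited is None:
--         visited = set()
--
--     if grouping_name in visited:
--         return set()
--     visited.add(grouping_name)
--
--     if grouping_name not in all_groupings:
--         return set()
--
--     airports: Set[str] = set()
--     stack = list(reversed(all_groupings[grouping_name]))
--     while stack:
--         name = stack.pop()
--         if name in all_groupings:
--             if name not in visited: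
--                 visited.add(name)
--                 stack.extend(reversed(all_groupings[name]))
--         else:
--             airports.add(name)
--     return airports
-- ===== Notes on version B (the rewrite author's own statement) =====
-- stated objective: alternative
-- what changed: Replaced A's recursive DFS (with an airports set merged up through recursive calls) by an iterative DFS over an explicit stack of pending items with a single airports accumulator; the caller-supplied visited set is mutated identically.
import Mathlib
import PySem

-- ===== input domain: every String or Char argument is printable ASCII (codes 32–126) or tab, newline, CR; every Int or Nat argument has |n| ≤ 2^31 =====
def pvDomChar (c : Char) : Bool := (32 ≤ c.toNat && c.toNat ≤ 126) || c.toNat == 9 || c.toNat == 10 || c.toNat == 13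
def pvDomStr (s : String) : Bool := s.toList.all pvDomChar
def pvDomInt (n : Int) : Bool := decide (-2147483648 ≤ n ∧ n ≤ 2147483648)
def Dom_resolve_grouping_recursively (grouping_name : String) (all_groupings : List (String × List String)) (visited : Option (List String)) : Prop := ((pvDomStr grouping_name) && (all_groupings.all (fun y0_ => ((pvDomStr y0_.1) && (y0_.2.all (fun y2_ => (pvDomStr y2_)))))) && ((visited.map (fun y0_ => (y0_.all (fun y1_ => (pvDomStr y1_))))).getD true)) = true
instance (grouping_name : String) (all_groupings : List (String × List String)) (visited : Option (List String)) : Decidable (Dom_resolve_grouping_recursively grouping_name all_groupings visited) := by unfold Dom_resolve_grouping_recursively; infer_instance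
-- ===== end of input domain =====

-- B is an iterative DFS with an explicit stack instead of A's recursion; equivalence is about the
-- RETURN value only (both Pythons also mutate a caller-supplied `visited` set, in the same way).

-- number of entries of the association list whose key is not yet visited (termination measure)
def pvKv (g : List (String × List String)) (v : PySem.Set String) : Nat :=
  (g.filter (fun p => !(PySem.Set.contains v p.1))).length

theorem pvKv_antitone (g : List (String × List String)) (v w : PySem.Set String)
    (h : ∀ x, x ∈ v → x ∈ w) : pvKv g w ≤ pvKv g v := by
  simp only [pvKv, ← List.countP_eq_length_filter]
  apply List.countP_mono_left
  intro p _ hp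
  cases hcv : PySem.Set.contains v p.1 with
  | false => rfl
  | true =>
    have hw := (PySem.Set.contains_iff w p.1).mpr (h p.1 ((PySem.Set.contains_iff v p.1).mp hcv))
    rw [hw] at hp
    exact absurd hp (by simp)

-- cited by pvStepB's decreasing_by: expanding an unvisited key strictly shrinks the measure
theorem pvKv_lt (g : List (String × List String)) (v : PySem.Set String) (name : String)
    (h1 : name ∈ g.map Prod.fst) (h2 : PySem.Set.contains v name = false) :
    pvKv g (PySem.Set.add v name) < pvKv g v := by
  have hsub : ∀ x, x ∈ v → x ∈ PySem.Set.add v name :=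
    fun x hx => (PySem.Set.mem_add v name x).mpr (Or.inl hx)
  induction g with
  | nil => simp at h1
  | cons p rest ih =>
    have hmono : pvKv rest (PySem.Set.add v name) ≤ pvKv rest v := pvKv_antitone rest v _ hsub
    simp only [List.map_cons, List.mem_cons] at h1
    rcases h1 with h1 | h1
    · have hca : PySem.Set.contains (PySem.Set.add v name) p.1 = true :=
        (PySem.Set.contains_iff _ _).mpr ((PySem.Set.mem_add _ _ _).mpr (Or.inr h1.symm))
      have hcv : PySem.Set.contains v p.1 = false := h1 ▸ h2
      simp only [pvKv, List.filter_cons, hca, hcv, Bool.not_true, Bool.not_false, if_true,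
        List.length_cons]
      exact Nat.lt_succ_of_le hmono
    · have hlt := ih h1
      by_cases hpv : PySem.Set.contains v p.1 = true
      · have hpa : PySem.Set.contains (PySem.Set.add v name) p.1 = true :=
          (PySem.Set.contains_iff _ _).mpr (hsub _ ((PySem.Set.contains_iff _ _).mp hpv))
        simpa only [pvKv, List.filter_cons, hpv, hpa, Bool.not_true, if_false] using hlt
      · have hpv' : PySem.Set.contains v p.1 = false := Bool.eq_false_iff.mpr hpv
        by_cases hpa : PySem.Set.contains (PySem.Set.add v name) p.1 = true
        · have hstep : pvKv rest (PySem.Set.add v name) < pvKv rest v + 1 := Nat.lt_succ_of_lt hlt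
          simpa only [pvKv, List.filter_cons, hpv', hpa, Bool.not_true, Bool.not_false, if_false,
            if_true, List.length_cons] using hstep
        · have hpa' : PySem.Set.contains (PySem.Set.add v name) p.1 = false := Bool.eq_false_iff.mpr hpa
          have hstep : pvKv rest (PySem.Set.add v name) + 1 < pvKv rest v + 1 := Nat.succ_lt_succ hlt
          simpa only [pvKv, List.filter_cons, hpv', hpa', Bool.not_false, if_true,
            List.length_cons] using hstep

-- ===== PORT A =====
-- literal recursion of A, guarded by fuel to make it total; fuel `|all_groupings| + 1` always
-- suffices because every nested call adds one more not-yet-visited key to `visited`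
def pvGoA : Nat → String → List (String × List String) → PySem.Set String → (PySem.Set String × PySem.Set String)
  | 0, _, _, visited => ([], visited)
  | fuel+1, grouping_name, g, visited =>
    -- if grouping_name in visited: return set()
    if PySem.Set.contains visited grouping_name then ([], visited) else
    -- visited.add(grouping_name)
    let visited := PySem.Set.add visited grouping_name
    match (PySem.Dict.mk g).get? grouping_name with
    | none => ([], visited)                 -- if grouping_name not in all_groupings: return set()
    | some items =>
      -- airports = set(); for item in items: …
      items.foldl (fun p item =>
        if (PySem.Dict.mk g).contains item then
          let q := pvGoA fuel item g p.2    -- recursive call (mutates visited = p.2)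
          (PySem.Set.update p.1 q.1, q.2)   -- airports.update(…)
        else (PySem.Set.add p.1 item, p.2)) -- airports.add(item)
        ([], visited)

def resolve_grouping_recursively (grouping_name : String) (all_groupings : List (String × List String)) (visited : Option (List String)) : List String :=
  (pvGoA (all_groupings.length + 1) grouping_name all_groupings (visited.getD [])).1

-- ===== PORT B =====
-- the while-loop of Source B; the Lean stack is the REVERSE of the Python list (head = top, so
-- `pop()` is taking the head and `extend(reversed(items))` is prepending `items`);
-- state (airports, visited) returned as a pair, wrapper keeps airports
def pvStepB (g : List (String × List String)) : List String → PySem.Set String → PySem.Set String → (PySem.Set String × PySem.Set String)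
  | [], visited, airports => (airports, visited)
  | name :: rest, visited, airports =>
    if _h1 : (PySem.Dict.mk g).contains name then
      if _h2 : PySem.Set.contains visited name then
        pvStepB g rest visited airports
      else
        pvStepB g ((PySem.Dict.mk g).getD name [] ++ rest) (PySem.Set.add visited name) airports
    else
      pvStepB g rest visited (PySem.Set.add airports name)
  termination_by stack visited _ => (pvKv g visited, stack.length)
  decreasing_by
  · exact Prod.Lex.right _ (by simp)
  · exact Prod.Lex.left _ _ (pvKv_lt g visited name (by simpa [PySem.Dict.contains_iff_mem_keys] using _h1) (by simpa using _h2))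
  · exact Prod.Lex.right _ (by simp)

def resolve_grouping_recursively_alt (grouping_name : String) (all_groupings : List (String × List String)) (visited : Option (List String)) : List String :=
  let v0 := visited.getD []
  if PySem.Set.contains v0 grouping_name then [] else
  let v1 := PySem.Set.add v0 grouping_name
  match (PySem.Dict.mk all_groupings).get? grouping_name with
  | none => []
  | some items => (pvStepB all_groupings items v1 []).1

-- ===== PRECONDITION & SPEC =====
def Spec_resolve_grouping_recursively (grouping_name : String) (all_groupings : List (String × List String)) (visited : Option (List String)) (out : List String) : Prop := out = resolve_grouping_recursively_alt grouping_name all_groupings visited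
instance (grouping_name : String) (all_groupings : List (String × List String)) (visited : Option (List String)) (out : List String) : Decidable (Spec_resolve_grouping_recursively grouping_name all_groupings visited out) := by unfold Spec_resolve_grouping_recursively; infer_instance

-- ===== CLAIM (what is proved, stated in full; the proofs are below) =====
def Claim_equal_resolve_grouping_recursively : Prop := ∀ (grouping_name : String) (all_groupings : List (String × List String)) (visited : Option (List String)), Dom_resolve_grouping_recursively grouping_name all_groupings visited → Spec_resolve_grouping_recursively grouping_name all_groupings visited (resolve_grouping_recursively grouping_name all_groupings visited)

-- ===== LEMMAS AND PROOFS =====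

-- the loop body of A's fold, fuel fixed (definitionally the lambda inside pvGoA)
def pvBody (g : List (String × List String)) (f : Nat) :
    (PySem.Set String × PySem.Set String) → String → (PySem.Set String × PySem.Set String) :=
  fun p item =>
    if (PySem.Dict.mk g).contains item then
      let q := pvGoA f item g p.2
      (PySem.Set.update p.1 q.1, q.2)
    else (PySem.Set.add p.1 item, p.2)

theorem pvGoA_succ (f : Nat) (name : String) (g : List (String × List String)) (v : PySem.Set String) :
    pvGoA (f+1) name g v =
      if PySem.Set.contains v name then ([], v) else
      match (PySem.Dict.mk g).get? name with
      | none => ([], PySem.Set.add v name)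
      | some items => items.foldl (pvBody g f) ([], PySem.Set.add v name) := by
  rfl

theorem pvUpdate_add (a b : PySem.Set String) (x : String) :
    PySem.Set.update a (PySem.Set.add b x) = PySem.Set.add (PySem.Set.update a b) x := by
  by_cases hx : x ∈ b
  · rw [PySem.Set.add_of_mem hx, PySem.Set.add_of_mem ((PySem.Set.mem_update a b x).mpr (Or.inr hx))]
  · rw [PySem.Set.add_of_not_mem hx, PySem.Set.update_append, PySem.Set.update_cons, PySem.Set.update_nil]

-- updating with an updated set is updating with both streams in turn
theorem pvUpdate_assoc (a b : PySem.Set String) (c : List String) :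
    PySem.Set.update a (PySem.Set.update b c) = PySem.Set.update (PySem.Set.update a b) c := by
  induction c generalizing b with
  | nil => rw [PySem.Set.update_nil, PySem.Set.update_nil]
  | cons x c ih => rw [PySem.Set.update_cons, PySem.Set.update_cons, ih, pvUpdate_add]

-- the airports accumulator of A's fold factors through the empty accumulator
theorem pvFoldAcc (g : List (String × List String)) (f : Nat) (stack : List String)
    (a v : PySem.Set String) :
    stack.foldl (pvBody g f) (a, v) =
      (PySem.Set.update a (stack.foldl (pvBody g f) ([], v)).1, (stack.foldl (pvBody g f) ([], v)).2) := by
  induction stack generalizing a v with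
  | nil => simp [PySem.Set.update_nil]
  | cons name rest ih =>
    simp only [List.foldl_cons]
    by_cases hc : (PySem.Dict.mk g).contains name = true
    · simp only [pvBody, hc, if_true]
      rw [ih (PySem.Set.update a (pvGoA f name g v).1) (pvGoA f name g v).2,
          ih (PySem.Set.update [] (pvGoA f name g v).1) (pvGoA f name g v).2]
      rw [pvUpdate_assoc a (PySem.Set.update [] (pvGoA f name g v).1), pvUpdate_assoc a [],
          PySem.Set.update_nil]
    · simp only [pvBody, hc, if_false, Bool.false_eq_true]
      rw [ih (PySem.Set.add a name) v, ih (PySem.Set.add [] name) v]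
      have h1 : PySem.Set.add ([] : PySem.Set String) name = [name] := rfl
      have h2 : PySem.Set.update a [name] = PySem.Set.add a name := by
        rw [PySem.Set.update_cons, PySem.Set.update_nil]
      rw [h1, pvUpdate_assoc a [name], h2]

-- A's fold never removes anything from visited
theorem pvFold_mono (g : List (String × List String)) (f : Nat)
    (h : ∀ (name : String) (v : PySem.Set String) (x : String), x ∈ v → x ∈ (pvGoA f name g v).2) :
    ∀ (stack : List String) (p : PySem.Set String × PySem.Set String) (x : String),
      x ∈ p.2 → x ∈ (stack.foldl (pvBody g f) p).2 := by
  intro stack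
  induction stack with
  | nil => intro p x hx; simpa using hx
  | cons name rest ih =>
    intro p x hx
    simp only [List.foldl_cons]
    apply ih
    by_cases hc : (PySem.Dict.mk g).contains name = true
    · simpa [pvBody, hc] using h name p.2 x hx
    · simpa [pvBody, hc] using hx

-- A's recursion never removes anything from visited
theorem pvGoA_mono (f : Nat) (name : String) (g : List (String × List String))
    (v : PySem.Set String) (x : String) (hx : x ∈ v) : x ∈ (pvGoA f name g v).2 := by
  induction f generalizing name v x with
  | zero => simpa [pvGoA] using hx
  | succ f ih =>
    rw [pvGoA_succ]
    have hx' : x ∈ PySem.Set.add v name := (PySem.Set.mem_add v name x).mpr (Or.inl hx)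
    by_cases hv : name ∈ v
    · simpa [hv] using hx
    · cases hget : (PySem.Dict.mk g).get? name with
      | none => simpa [hv, hget] using hx'
      | some items =>
        simpa [hv, hget] using
          pvFold_mono g f (fun n w y hy => ih n w y hy) items ([], PySem.Set.add v name) x hx'

-- B's stack is consumed left to right
theorem pvStepB_append (g : List (String × List String)) (s1 s2 : List String)
    (v a : PySem.Set String) :
    pvStepB g (s1 ++ s2) v a = pvStepB g s2 (pvStepB g s1 v a).2 (pvStepB g s1 v a).1 := by
  induction s1, v, a using pvStepB.induct g with
  | case1 v a => simp [pvStepB]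
  | case2 name rest v a h1 h2 ih =>
    rw [List.cons_append, pvStepB, pvStepB]
    simp only [h1, h2, dif_pos]
    exact ih
  | case3 name rest v a h1 h2 ih =>
    rw [List.cons_append, pvStepB, pvStepB]
    simp only [h1, h2, dif_pos, Bool.false_eq_true]
    simpa [List.append_assoc] using ih
  | case4 name rest v a h1 ih =>
    rw [List.cons_append, pvStepB, pvStepB]
    simp only [h1]
    exact ih

-- MAIN: with enough fuel, B's stack loop computes exactly A's fold
theorem pvMain (g : List (String × List String)) (f : Nat) :
    ∀ (stack : List String) (v a : PySem.Set String), pvKv g v < f →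
      pvStepB g stack v a = stack.foldl (pvBody g f) (a, v) := by
  induction f using Nat.strong_induction_on with
  | _ f ihf =>
  intro stack
  induction stack with
  | nil => intro v a hf; simp [pvStepB]
  | cons name rest ih =>
    intro v a hf
    obtain ⟨f', rfl⟩ : ∃ f', f = f' + 1 := ⟨f - 1, by omega⟩
    by_cases hc : (PySem.Dict.mk g).contains name = true
    · by_cases hv : PySem.Set.contains v name = true
      · rw [pvStepB]
        simp only [hc, hv, dif_pos, List.foldl_cons, pvBody, if_true]
        rw [pvGoA_succ]
        simp only [hv, if_true]
        rw [PySem.Set.update_nil]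
        exact ih v a hf
      · obtain ⟨items, hget⟩ : ∃ items, (PySem.Dict.mk g).get? name = some items := by
          rw [PySem.Dict.contains_eq_isSome_get?] at hc
          exact Option.isSome_iff_exists.mp hc
        have hgetD : (PySem.Dict.mk g).getD name [] = items := by
          rw [PySem.Dict.getD_eq_get?_getD, hget]; rfl
        have hmem : name ∈ g.map Prod.fst := by
          simpa [PySem.Dict.keys] using (PySem.Dict.contains_iff_mem_keys _ _).mp hc
        have hv' : PySem.Set.contains v name = false := Bool.eq_false_iff.mpr hv
        have hkv : pvKv g (PySem.Set.add v name) < f' := by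
          have h1 := pvKv_lt g v name hmem hv'
          omega
        rw [pvStepB]
        simp only [hc, hv, dif_pos, hgetD]
        rw [pvStepB_append]
        have hQ := ihf f' (by omega) items (PySem.Set.add v name) a hkv
        have hFA := pvFoldAcc g f' items a (PySem.Set.add v name)
        set S := items.foldl (pvBody g f') ([], PySem.Set.add v name) with hS
        have hsub : ∀ x, x ∈ PySem.Set.add v name → x ∈ S.2 :=
          fun x hx => pvFold_mono g f' (fun n w y hy => pvGoA_mono f' n g w y hy) items
            ([], PySem.Set.add v name) x hx
        have hS2 : pvKv g S.2 < f' + 1 := by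
          have := pvKv_antitone g (PySem.Set.add v name) S.2 hsub
          omega
        rw [hQ, hFA]
        rw [ih S.2 (PySem.Set.update a S.1) hS2]
        simp only [List.foldl_cons, pvBody, hc, if_true]
        rw [pvGoA_succ]
        simp only [hv, hget, if_false, Bool.false_eq_true, ← hS]
        rw [dif_neg not_false]
    · rw [pvStepB]
      simp only [hc]
      rw [ih v (PySem.Set.add a name) hf]
      simp only [List.foldl_cons, pvBody, hc, if_false, Bool.false_eq_true]
      rw [dif_neg not_false]

theorem pvKv_le (g : List (String × List String)) (v : PySem.Set String) : pvKv g v ≤ g.length := by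
  simpa [pvKv] using List.length_filter_le _ g

-- ===== VERDICT (by name: the statement is the Claim_ definition above) =====
theorem resolve_grouping_recursively_spec : Claim_equal_resolve_grouping_recursively := by
  intro name g vis _
  unfold Spec_resolve_grouping_recursively resolve_grouping_recursively resolve_grouping_recursively_alt
  rw [pvGoA_succ]
  by_cases hv : name ∈ vis.getD []
  · simp [hv]
  · cases hget : (PySem.Dict.mk g).get? name with
    | none => simp [hv]
    | some items =>
      dsimp only
      have hmem : name ∈ g.map Prod.fst := by
        have hc : (PySem.Dict.mk g).contains name = true := by
          rw [PySem.Dict.contains_eq_isSome_get?, hget]; rfl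
        simpa [PySem.Dict.keys] using (PySem.Dict.contains_iff_mem_keys _ _).mp hc
      have hv' : PySem.Set.contains (vis.getD []) name = false :=
        Bool.eq_false_iff.mpr (fun h => hv ((PySem.Set.contains_iff _ _).mp h))
      have hkv : pvKv g (PySem.Set.add (vis.getD []) name) < g.length := by
        have h1 := pvKv_lt g (vis.getD []) name hmem hv'
        have h2 := pvKv_le g (vis.getD [])
        omega
      rw [pvMain g g.length items (PySem.Set.add (vis.getD []) name) [] hkv]
      rw [if_neg (fun h => hv ((PySem.Set.contains_iff _ _).mp h)),
          if_neg (fun h => hv ((PySem.Set.contains_iff _ _).mp h))]
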